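-- pv_equiv track=rewrite | github.com/pechyonkin/nand2tetris | projects/06/assembler/assembler/parser.py | get_label_symbols_dict
-- ===== SOURCE A (Python) =====
-- from enum import Enum
-- from typing import List, Dict
--
-- class LineType(Enum):
--     COMMENT_LINE = 1
--     EMPTY_LINE = 2
--     A_INSTRUCTION = 3
--     C_INSTRUCTION = 4
--     LABEL_SYMBOL = 5
--
-- def get_line_type(line: str) -> LineType:
--     """Determine line type of code line.
--
--     :param line: code line with whitespace stripped on left and right
--     :return: LineType of line
--     """
--     if not line:
--         return LineType.EMPTY_LINE
--     if line.startswith("//"):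
--         return LineType.COMMENT_LINE
--     if line.startswith("@"):
--         return LineType.A_INSTRUCTION
--     if line.startswith("("):
--         return LineType.LABEL_SYMBOL
--     return LineType.C_INSTRUCTION
--
-- def get_label_symbols_dict(lines: List[str]) -> Dict[str, int]:
--     symbols_dict = dict()
--     cur_code_line = -1
--     for line in lines:
--         line_type = get_line_type(line=line)
--         if line_type == LineType.A_INSTRUCTION:
--             cur_code_line += 1
--         elif line_type == LineType.C_INSTRUCTION:
--             cur_code_line += 1
--         elif line_type == LineType.LABEL_SYMBOL:
--             symbol = line[1:-1]
--             symbols_dict[symbol] = cur_code_line + 1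
--     return symbols_dict
-- ===== SOURCE B (Python) =====
-- from itertools import accumulate
--
-- def _is_code(line):
--     return bool(line) and not line.startswith("//") and not line.startswith("(")
--
-- def get_label_symbols_dict(lines):
--     counts = list(accumulate((1 if _is_code(line) else 0 for line in lines), initial=0))
--     return {line[1:-1]: counts[i] for i, line in enumerate(lines) if line.startswith("(")}
-- ===== Notes on version B (the rewrite author's own statement) =====
-- stated objective: alternative
-- what changed: Replaced the single stateful counter loop by two passes: a prefix-count table of code lines built with itertools.accumulate, then a dict comprehension over enumerate that maps each '(label)' line to the table entry at its index.
import Mathlib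
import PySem

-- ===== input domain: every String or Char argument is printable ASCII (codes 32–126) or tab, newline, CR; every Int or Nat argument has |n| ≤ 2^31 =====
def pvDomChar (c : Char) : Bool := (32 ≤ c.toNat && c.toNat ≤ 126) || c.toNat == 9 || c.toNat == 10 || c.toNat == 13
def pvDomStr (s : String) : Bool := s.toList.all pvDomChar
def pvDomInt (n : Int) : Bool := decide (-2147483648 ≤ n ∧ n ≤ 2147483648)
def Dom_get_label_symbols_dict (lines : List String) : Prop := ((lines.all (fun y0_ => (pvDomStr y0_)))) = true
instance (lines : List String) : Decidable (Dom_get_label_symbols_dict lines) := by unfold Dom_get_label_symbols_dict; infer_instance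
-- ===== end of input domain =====

-- B replaces A's stateful counter loop by a prefix-count table plus a dict
-- comprehension over enumerate (objective: alternative decomposition, same cost).


-- ===== PORT A =====
inductive PvLineType
  | commentLine | emptyLine | aInstruction | cInstruction | labelSymbol
deriving DecidableEq, Repr

def get_line_type (line : String) : PvLineType :=
  if line = "" then .emptyLine
  else if PySem.Str.startswith line "//" then .commentLine
  else if PySem.Str.startswith line "@" then .aInstruction
  else if PySem.Str.startswith line "(" then .labelSymbol
  else .cInstruction

def get_label_symbols_dict (lines : List String) : List (String × Int) :=
  (lines.foldl (fun (st : PySem.Dict String Int × Int) line =>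
      let lt := get_line_type line
      if lt = .aInstruction then (st.1, st.2 + 1)
      else if lt = .cInstruction then (st.1, st.2 + 1)
      else if lt = .labelSymbol then
        (st.1.insert (PySem.Str.slice line (some 1) (some (-1))) (st.2 + 1), st.2)
      else st)
    (PySem.Dict.empty, -1)).1.items

-- ===== PORT B =====
def pvIsCode (line : String) : Bool :=
  !(line = "") && !(PySem.Str.startswith line "//") && !(PySem.Str.startswith line "(")

def get_label_symbols_dict_alt (lines : List String) : List (String × Int) :=
  let counts := (lines.map (fun line => if pvIsCode line then (1 : Int) else 0)).scanl (· + ·) 0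
  ((PySem.List.enumerate lines).foldl (fun (d : PySem.Dict String Int) p =>
      if PySem.Str.startswith p.2 "(" then
        d.insert (PySem.Str.slice p.2 (some 1) (some (-1))) (PySem.List.pyGetD counts p.1 0)
      else d)
    PySem.Dict.empty).items

-- ===== PRECONDITION & SPEC =====
def Spec_get_label_symbols_dict (lines : List String) (out : List (String × Int)) : Prop := out = get_label_symbols_dict_alt lines
instance (lines : List String) (out : List (String × Int)) : Decidable (Spec_get_label_symbols_dict lines out) := by unfold Spec_get_label_symbols_dict; infer_instance

-- ===== CLAIM (what is proved, stated in full; the proofs are below) =====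
def Claim_equal_get_label_symbols_dict : Prop := ∀ (lines : List String), Dom_get_label_symbols_dict lines → Spec_get_label_symbols_dict lines (get_label_symbols_dict lines)

-- ===== LEMMAS AND PROOFS =====

-- abbreviations for the two fold bodies and the 0/1 weight, used only in proofs
def pvG (line : String) : Int := if pvIsCode line then 1 else 0

def pvStepA (st : PySem.Dict String Int × Int) (line : String) : PySem.Dict String Int × Int :=
  let lt := get_line_type line
  if lt = .aInstruction then (st.1, st.2 + 1)
  else if lt = .cInstruction then (st.1, st.2 + 1)
  else if lt = .labelSymbol then
    (st.1.insert (PySem.Str.slice line (some 1) (some (-1))) (st.2 + 1), st.2)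
  else st

def pvStepB (counts : List Int) (d : PySem.Dict String Int) (p : Int × String) :
    PySem.Dict String Int :=
  if PySem.Str.startswith p.2 "(" then
    d.insert (PySem.Str.slice p.2 (some 1) (some (-1))) (PySem.List.pyGetD counts p.1 0)
  else d

lemma pv_head {l : List Char} (c : Char) (r : List Char)
    (h : PySem.Chars.startswith l (c :: r) = true) : ∃ t, l = c :: t := by
  rw [PySem.Chars.startswith_iff] at h
  rcases h with ⟨t, ht⟩
  exact ⟨r ++ t, by rw [← ht]; simp⟩

lemma pv_label_iff (x : String) :
    get_line_type x = .labelSymbol ↔ PySem.Str.startswith x "(" = true := by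
  constructor
  · intro h
    unfold get_line_type at h
    split_ifs at h <;> simp_all
  · intro h
    have hC : PySem.Chars.startswith x.toList ['('] = true := by simpa using h
    obtain ⟨t, ht⟩ := pv_head '(' [] hC
    have hne : x ≠ "" := by
      intro he; rw [he] at ht; simp at ht
    have h2 : PySem.Chars.startswith x.toList ['/', '/'] = false := by
      by_contra hc
      obtain ⟨t2, ht2⟩ := pv_head '/' ['/'] (by simpa using hc)
      rw [ht] at ht2; simp at ht2
    have h3 : PySem.Chars.startswith x.toList ['@'] = false := by
      by_contra hc
      obtain ⟨t3, ht3⟩ := pv_head '@' [] (by simpa using hc)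
      rw [ht] at ht3; simp at ht3
    unfold get_line_type
    split_ifs with a b c
    · exact absurd a hne
    · exact absurd (by simpa using b) (by simp [h2])
    · exact absurd (by simpa using c) (by simp [h3])
    · rfl

lemma pv_g_label {x : String} (h : PySem.Str.startswith x "(" = true) : pvG x = 0 := by
  have h' : PySem.Chars.startswith x.toList ['('] = true := by simpa using h
  simp [pvG, pvIsCode, h']

lemma pv_g_nonlabel {x : String} (h : ¬ PySem.Str.startswith x "(" = true) :
    (get_line_type x = .aInstruction ∨ get_line_type x = .cInstruction → pvG x = 1) ∧
    (get_line_type x = .emptyLine ∨ get_line_type x = .commentLine → pvG x = 0) := by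
  unfold get_line_type
  simp only [pvG, pvIsCode]
  split_ifs with h1 h2 h3 h4 <;> simp_all

lemma pv_scanl_getD_append (pre rest : List Int) (a : Int) :
    ((pre ++ rest).scanl (· + ·) a).getD pre.length 0 = a + pre.sum := by
  induction pre generalizing a with
  | nil =>
    rcases rest with _ | ⟨y, ys⟩ <;> simp [List.scanl]
  | cons x t ih =>
    rw [List.cons_append, List.scanl_cons]
    simp only [List.length_cons, List.getD_cons_succ, ih, List.sum_cons]
    ring

lemma pv_main : ∀ (rest pre : List String) (d : PySem.Dict String Int),
    (PySem.List.enumerate rest (pre.length : Int)).foldl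
      (pvStepB (((pre ++ rest).map pvG).scanl (· + ·) 0)) d
    = (rest.foldl pvStepA (d, (pre.map pvG).sum - 1)).1 := by
  intro rest
  induction rest with
  | nil => intro pre d; simp [PySem.List.enumerate]
  | cons x rest' ih =>
    intro pre d
    rw [PySem.List.enumerate_cons]
    simp only [List.foldl_cons]
    have happ : pre ++ x :: rest' = (pre ++ [x]) ++ rest' := by simp
    have hlen : (pre.length : Int) + 1 = (((pre ++ [x]).length : Nat) : Int) := by
      simp
    have hidx : PySem.List.pyGetD (((pre ++ x :: rest').map pvG).scanl (· + ·) 0)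
        ((pre.length : Int)) 0 = (pre.map pvG).sum := by
      rw [show ((pre ++ x :: rest').map pvG) = pre.map pvG ++ ((x :: rest').map pvG) by simp,
        PySem.List.pyGetD_natCast]
      rw [show pre.length = (pre.map pvG).length by simp]
      rw [pv_scanl_getD_append]
      ring
    by_cases hL : PySem.Str.startswith x "(" = true
    · have hlt : get_line_type x = .labelSymbol := (pv_label_iff x).mpr hL
      have hstep : pvStepB (((pre ++ x :: rest').map pvG).scanl (· + ·) 0) d ((pre.length : Int), x)
          = d.insert (PySem.Str.slice x (some 1) (some (-1))) ((pre.map pvG).sum) := by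
        simp only [pvStepB, hL, if_true, hidx]
      rw [hstep, hlen, happ, ih]
      have hsum : ((pre ++ [x]).map pvG).sum = (pre.map pvG).sum := by
        simp [pv_g_label hL]
      have hstepA : pvStepA (d, (pre.map pvG).sum - 1) x
          = (d.insert (PySem.Str.slice x (some 1) (some (-1))) ((pre.map pvG).sum),
             (pre.map pvG).sum - 1) := by
        simp [pvStepA, hlt]
      rw [hstepA, hsum]
    · have hg := pv_g_nonlabel hL
      have hlt : get_line_type x ≠ .labelSymbol := fun h => hL ((pv_label_iff x).mp h)
      have hstep : pvStepB (((pre ++ x :: rest').map pvG).scanl (· + ·) 0) d ((pre.length : Int), x)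
          = d := by
        have hL' : PySem.Chars.startswith x.toList ['('] = false := by
          cases e : PySem.Chars.startswith x.toList ['('] with
          | false => rfl
          | true => exact absurd (by simp [e]) hL
        simp [pvStepB, hL']
      rw [hstep, hlen, happ, ih]
      cases hcase : get_line_type x with
      | aInstruction =>
        have hgx : pvG x = 1 := hg.1 (Or.inl hcase)
        have hsum : ((pre ++ [x]).map pvG).sum = (pre.map pvG).sum + 1 := by simp [hgx]
        have : pvStepA (d, (pre.map pvG).sum - 1) x = (d, (pre.map pvG).sum - 1 + 1) := by
          simp [pvStepA, hcase]
        rw [this, hsum]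
        norm_num
      | cInstruction =>
        have hgx : pvG x = 1 := hg.1 (Or.inr hcase)
        have hsum : ((pre ++ [x]).map pvG).sum = (pre.map pvG).sum + 1 := by simp [hgx]
        have : pvStepA (d, (pre.map pvG).sum - 1) x = (d, (pre.map pvG).sum - 1 + 1) := by
          simp [pvStepA, hcase]
        rw [this, hsum]
        norm_num
      | labelSymbol => exact absurd hcase hlt
      | emptyLine =>
        have hgx : pvG x = 0 := hg.2 (Or.inl hcase)
        have hsum : ((pre ++ [x]).map pvG).sum = (pre.map pvG).sum := by simp [hgx]
        have : pvStepA (d, (pre.map pvG).sum - 1) x = (d, (pre.map pvG).sum - 1) := by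
          simp [pvStepA, hcase]
        rw [this, hsum]
      | commentLine =>
        have hgx : pvG x = 0 := hg.2 (Or.inr hcase)
        have hsum : ((pre ++ [x]).map pvG).sum = (pre.map pvG).sum := by simp [hgx]
        have : pvStepA (d, (pre.map pvG).sum - 1) x = (d, (pre.map pvG).sum - 1) := by
          simp [pvStepA, hcase]
        rw [this, hsum]

-- ===== VERDICT (by name: the statement is the Claim_ definition above) =====
theorem get_label_symbols_dict_spec : Claim_equal_get_label_symbols_dict := by
  intro lines _
  unfold Spec_get_label_symbols_dict
  have hA : get_label_symbols_dict lines
      = (lines.foldl pvStepA (PySem.Dict.empty, -1)).1.items := rfl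
  have hB : get_label_symbols_dict_alt lines
      = ((PySem.List.enumerate lines ((([] : List String).length : Nat) : Int)).foldl
          (pvStepB (((([] : List String) ++ lines).map pvG).scanl (· + ·) 0))
          PySem.Dict.empty).items := rfl
  rw [hA, hB, pv_main lines [] PySem.Dict.empty]
  norm_num
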